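-- pv_equiv track=rewrite | github.com/kscold/Algorithm | python/smu/exam1/201921330_김승찬_exam1/q4/q4.py | q4
-- ===== SOURCE A (Python) =====
-- def q4(n):
--     # your code is here
--     # ----------------------------------------------
--     dp = [10001] * (n + 1)
--     dp[0] = 0
--     for i in range(1, n + 1):
--         if i - 1 < 0:
--             break
--         else:
--             dp[i] = min(dp[i - 1] + 1, dp[i])
--             if i % 2 == 0:
--                 dp[i] = min(dp[i // 2] + 1, dp[i])
--     return dp[n]
-- ===== SOURCE B (Python) =====
-- def q4(n):
--     # closed form: building n from 0 with +1 / *2 costs bit_length(n) + popcount(n) - 1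
--     if n == 0:
--         return 0
--     return n.bit_length() + bin(n).count('1') - 1
-- ===== Notes on version B (the rewrite author's own statement) =====
-- stated objective: faster
-- what changed: Replaces the O(n) dynamic-programming table with the closed binary-representation formula bit_length(n) + popcount(n) - 1.
import Mathlib
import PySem

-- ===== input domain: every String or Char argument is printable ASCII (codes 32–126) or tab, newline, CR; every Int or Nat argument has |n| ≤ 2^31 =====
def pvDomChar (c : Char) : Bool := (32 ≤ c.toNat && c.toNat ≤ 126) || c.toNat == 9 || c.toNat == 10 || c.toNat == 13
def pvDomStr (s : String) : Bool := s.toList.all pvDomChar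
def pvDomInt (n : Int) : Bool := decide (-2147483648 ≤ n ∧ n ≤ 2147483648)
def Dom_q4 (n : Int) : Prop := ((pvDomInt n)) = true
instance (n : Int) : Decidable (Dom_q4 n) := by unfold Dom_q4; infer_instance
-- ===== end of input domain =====

-- B replaces A's O(n) DP table with the closed formula bit_length(n) + popcount(n) - 1 (objective: faster).

-- ===== PORT A =====
-- one loop step of A's 'for i in range(1, n+1)' (state: dp table, broken flag)
def q4Step (st : List Int × Bool) (i : Int) : List Int × Bool :=
  if st.2 then st
  else if i - 1 < 0 then (st.1, true)
  else
    let dp := st.1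
    let dp := dp.set i.toNat (min ((PySem.List.pyGet? dp (i - 1)).getD 0 + 1) ((PySem.List.pyGet? dp i).getD 0))
    let dp := if PySem.Int.mod i 2 = 0 then
        dp.set i.toNat (min ((PySem.List.pyGet? dp (PySem.Int.floordiv i 2)).getD 0 + 1) ((PySem.List.pyGet? dp i).getD 0))
      else dp
    (dp, false)

def q4 (n : Int) : Int :=
  let dp : List Int := List.replicate (n + 1).toNat 10001
  let dp := dp.set 0 0
  let st := (PySem.List.pyRange 1 (n + 1) 1).foldl q4Step (dp, false)
  (PySem.List.pyGet? st.1 n).getD 0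

-- ===== PORT B =====
-- n.bit_length()
def blen (n : Nat) : Nat :=
  if n = 0 then 0 else blen (n / 2) + 1
decreasing_by exact Nat.div_lt_self (Nat.pos_of_ne_zero (by assumption)) (by norm_num)

-- bin(n).count('1') : number of 1-bits of |n|
def popc (n : Nat) : Nat :=
  if n = 0 then 0 else popc (n / 2) + n % 2
decreasing_by exact Nat.div_lt_self (Nat.pos_of_ne_zero (by assumption)) (by norm_num)

def q4_alt (n : Int) : Int :=
  if n = 0 then 0 else (blen n.natAbs : Int) + (popc n.natAbs : Int) - 1

-- ===== PRECONDITION & SPEC =====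
-- Pre_ excludes negative inputs, where A raises IndexError (the dp table comes out empty, so its first write fails).
def Pre_q4 (n : Int) : Prop := 0 ≤ n
instance (n : Int) : Decidable (Pre_q4 n) := by unfold Pre_q4; infer_instance
def pvWitness_q4 : Int := 6

def Spec_q4 (n : Int) (out : Int) : Prop := out = q4_alt n
instance (n : Int) (out : Int) : Decidable (Spec_q4 n out) := by unfold Spec_q4; infer_instance

-- ===== CLAIM (what is proved, stated in full; the proofs are below) =====
def Claim_equal_q4 : Prop := ∀ (n : Int), Dom_q4 n → Pre_q4 n → Spec_q4 n (q4 n)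

-- ===== LEMMAS AND PROOFS =====

-- the closed-form cost as a function of the table index
def cost (i : Nat) : Int := if i = 0 then 0 else (blen i : Int) + (popc i : Int) - 1

theorem blen_zero : blen 0 = 0 := by simp [blen]
theorem popc_zero : popc 0 = 0 := by simp [popc]
theorem blen_ne (n : Nat) (h : n ≠ 0) : blen n = blen (n / 2) + 1 := by
  rw [blen]; simp [h]
theorem popc_ne (n : Nat) (h : n ≠ 0) : popc n = popc (n / 2) + n % 2 := by
  rw [popc]; simp [h]

theorem blen_two_mul (k : Nat) (h : k ≠ 0) : blen (2 * k) = blen k + 1 := by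
  rw [blen_ne (2 * k) (by omega)]
  congr 2
  omega
theorem blen_two_mul_add_one (k : Nat) : blen (2 * k + 1) = blen k + 1 := by
  rw [blen_ne (2 * k + 1) (by omega)]
  congr 2
  omega
theorem popc_two_mul (k : Nat) : popc (2 * k) = popc k := by
  rcases Nat.eq_zero_or_pos k with h | h
  · simp [h]
  · rw [popc_ne (2 * k) (by omega)]
    have h1 : 2 * k / 2 = k := by omega
    have h2 : 2 * k % 2 = 0 := by omega
    rw [h1, h2]
    simp
theorem popc_two_mul_add_one (k : Nat) : popc (2 * k + 1) = popc k + 1 := by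
  rw [popc_ne (2 * k + 1) (by omega)]
  have h1 : (2 * k + 1) / 2 = k := by omega
  have h2 : (2 * k + 1) % 2 = 1 := by omega
  rw [h1, h2]

theorem cost_zero : cost 0 = 0 := by simp [cost]
theorem cost_one : cost 1 = 1 := by
  simp [cost, blen_ne 1 (by omega), popc_ne 1 (by omega), blen_zero, popc_zero]

theorem cost_odd (k : Nat) : cost (2 * k + 1) = cost (2 * k) + 1 := by
  rcases Nat.eq_zero_or_pos k with h | h
  · subst h; simpa [cost_zero] using cost_one
  · simp only [cost, if_neg (by omega : ¬ 2 * k + 1 = 0), if_neg (by omega : ¬ 2 * k = 0)]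
    rw [blen_two_mul_add_one, popc_two_mul_add_one, blen_two_mul k (by omega), popc_two_mul]
    push_cast
    ring

theorem cost_even (k : Nat) (h : 1 ≤ k) : cost (2 * k) = cost k + 1 := by
  simp only [cost, if_neg (by omega : ¬ 2 * k = 0), if_neg (by omega : ¬ k = 0)]
  rw [blen_two_mul k (by omega), popc_two_mul]
  push_cast
  ring

theorem cost_two : cost 2 = 2 := by
  have := cost_even 1 (by omega)
  simpa [cost_one] using this

theorem cost_q : ∀ k : Nat, 1 ≤ k → cost (2 * k) ≤ cost (2 * k - 1) + 1 := by
  intro k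
  induction k using Nat.strong_induction_on with
  | _ k ih =>
    intro hk
    rcases Nat.lt_or_ge k 2 with h2 | h2
    · -- k = 1
      have hk1 : k = 1 := by omega
      subst hk1
      simp only [show 2 * 1 = 2 from rfl, show 2 * 1 - 1 = 1 from rfl, cost_two, cost_one]
      omega
    · -- k ≥ 2
      have e2 : cost (2 * k - 1) = cost (k - 1) + 2 := by
        have e1 : 2 * k - 1 = 2 * (k - 1) + 1 := by omega
        rw [e1, cost_odd, cost_even (k - 1) (by omega)]
        ring
      have e3 : cost (2 * k) = cost k + 1 := cost_even k (by omega)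
      -- need: cost k ≤ cost (k - 1) + 2
      have key : cost k ≤ cost (k - 1) + 2 := by
        rcases Nat.even_or_odd k with he | ho
        · obtain ⟨j, hj⟩ := he
          have hj' : k = 2 * j := by omega
          have := ih j (by omega) (by omega)
          have hja : 2 * j = k := by omega
          rw [hja] at this
          omega
        · obtain ⟨j, hj⟩ := ho
          have h1 := cost_odd j
          have hja : 2 * j + 1 = k := by omega
          have hjb : 2 * j = k - 1 := by omega
          rw [hja, hjb] at h1
          omega
      omega

theorem popc_le_blen : ∀ n : Nat, popc n ≤ blen n := by
  intro n
  induction n using Nat.strong_induction_on with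
  | _ n ih =>
    rcases Nat.eq_zero_or_pos n with h | h
    · simp [h, popc_zero, blen_zero]
    · rw [popc_ne n (by omega), blen_ne n (by omega)]
      have := ih (n / 2) (by omega)
      omega

theorem blen_le_of_lt : ∀ m n : Nat, n < 2 ^ m → blen n ≤ m := by
  intro m
  induction m with
  | zero => intro n h; interval_cases n; simp [blen_zero]
  | succ m ih =>
    intro n h
    rcases Nat.eq_zero_or_pos n with h0 | h0
    · simp [h0, blen_zero]
    · rw [blen_ne n (by omega)]
      have : n / 2 < 2 ^ m := by
        have := Nat.pow_succ 2 m
        omega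
      have := ih (n / 2) this
      omega

theorem cost_le (i : Nat) (h : i < 2 ^ 32) : cost i ≤ 10000 := by
  rcases Nat.eq_zero_or_pos i with h0 | h0
  · simp [h0, cost_zero]
  · have hb := blen_le_of_lt 32 i h
    have hp := popc_le_blen i
    simp only [cost, if_neg (by omega : ¬ i = 0)]
    have : (blen i : Int) ≤ 32 := by exact_mod_cast hb
    have : (popc i : Int) ≤ 32 := by
      have : popc i ≤ 32 := le_trans hp hb
      exact_mod_cast this
    omega

-- the recurrence A's loop body computes, matched against cost
theorem cost_step_odd (m : Nat) (h : (m + 1) % 2 = 1) :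
    cost (m + 1) = cost m + 1 := by
  obtain ⟨k, hk⟩ : ∃ k, m + 1 = 2 * k + 1 := ⟨(m + 1) / 2, by omega⟩
  have hm : m = 2 * k := by omega
  rw [hk, hm, cost_odd]

theorem cost_step_even (m : Nat) (h : (m + 1) % 2 = 0) :
    cost (m + 1) = min (cost ((m + 1) / 2) + 1) (cost m + 1) ∧ (m + 1) / 2 ≤ m := by
  obtain ⟨k, hk⟩ : ∃ k, m + 1 = 2 * k := ⟨(m + 1) / 2, by omega⟩
  have hk1 : 1 ≤ k := by omega
  have hd : (m + 1) / 2 = k := by omega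
  constructor
  · rw [hd, hk]
    have hq := cost_q k hk1
    have he := cost_even k hk1
    have hm : 2 * k - 1 = m := by omega
    rw [hm] at hq
    rw [min_eq_left (by omega)]
    omega
  · omega

-- the initial table
def initTab (N : Nat) : List Int := (List.replicate (N + 1) (10001 : Int)).set 0 0

theorem initTab_length (N : Nat) : (initTab N).length = N + 1 := by
  simp [initTab]

theorem initTab_getD (N j : Nat) (hj : j ≤ N) :
    (initTab N).getD j 0 = if j = 0 then 0 else 10001 := by
  simp only [initTab, List.getD]
  rcases Nat.eq_zero_or_pos j with h0 | h0
  · subst h0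
    rw [List.getElem?_set_self (by simp)]
    simp
  · rw [if_neg (by omega), List.getElem?_set_ne (by omega : (0:Nat) ≠ j)]
    rw [List.getElem?_replicate_of_lt (by omega)]
    rfl

theorem getD_set_of_lt {l : List Int} {k j : Nat} {v : Int} (hk : k < l.length) :
    (l.set k v).getD j 0 = if j = k then v else l.getD j 0 := by
  simp only [List.getD]
  rcases eq_or_ne j k with h | h
  · subst h
    rw [List.getElem?_set_self hk, if_pos rfl]
    rfl
  · rw [List.getElem?_set_ne (Ne.symm h), if_neg h]

-- main invariant of A's fold
theorem q4_inv (N : Nat) (hN : N ≤ 2 ^ 31) :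
    ∀ m : Nat, m ≤ N →
      ∃ dp : List Int,
        (PySem.List.pyRange 1 (1 + (m : Int)) 1).foldl q4Step (initTab N, false) = (dp, false) ∧
        dp.length = N + 1 ∧
        ∀ j : Nat, j ≤ N → dp.getD j 0 = if j ≤ m then cost j else 10001 := by
  intro m
  induction m with
  | zero =>
    intro _
    refine ⟨initTab N, ?_, initTab_length N, ?_⟩
    · simp only [Nat.cast_zero, add_zero]
      rw [PySem.List.pyRange_one_eq_nil (le_refl 1)]
      rfl
    · intro j hj
      rw [initTab_getD N j hj]
      rcases Nat.eq_zero_or_pos j with h0 | h0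
      · simp [h0, cost_zero]
      · rw [if_neg (by omega), if_neg (by omega)]
  | succ m ih =>
    intro hm
    obtain ⟨dp, hfold, hlen, hval⟩ := ih (by omega)
    have hsplit : PySem.List.pyRange 1 (1 + ((m : Int) + 1)) 1
        = PySem.List.pyRange 1 (1 + (m : Int)) 1 ++ [1 + (m : Int)] := by
      have := PySem.List.pyRange_one_succ_right (a := 1) (b := 1 + (m : Int)) (by omega)
      rw [show (1 + (m : Int) + 1) = 1 + ((m : Int) + 1) by ring] at this
      exact this
    simp only [Nat.cast_add, Nat.cast_one]
    rw [hsplit, List.foldl_append, hfold]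
    -- now one q4Step at i = 1 + m
    have hi0 : ¬ ((1 : Int) + (m : Int) - 1 < 0) := by omega
    have hiNat : ((1 : Int) + (m : Int)).toNat = m + 1 := by omega
    have hget1 : (PySem.List.pyGet? dp ((1 : Int) + (m : Int) - 1)).getD 0 = cost m := by
      rw [show (1 : Int) + (m : Int) - 1 = ((m : Nat) : Int) by ring]
      rw [PySem.List.pyGet?_natCast]
      have := hval m (by omega)
      simpa [List.getD, if_pos (le_refl m)] using this
    have hget2 : (PySem.List.pyGet? dp ((1 : Int) + (m : Int))).getD 0 = 10001 := by
      rw [show (1 : Int) + (m : Int) = ((m + 1 : Nat) : Int) by push_cast; ring]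
      rw [PySem.List.pyGet?_natCast]
      have := hval (m + 1) (by omega)
      rw [if_neg (by omega)] at this
      simpa [List.getD] using this
    have hcostm : cost m + 1 ≤ 10001 := by
      have := cost_le m (by omega)
      omega
    have hmin1 : min (cost m + 1) (10001 : Int) = cost m + 1 := min_eq_left hcostm
    -- the first-set table dp1
    set dp1 := dp.set (m + 1) (cost m + 1) with hdp1
    have hlen1 : dp1.length = N + 1 := by simp [hdp1, hlen]
    have hval1 : ∀ j : Nat, j ≤ N → dp1.getD j 0 =
        if j = m + 1 then cost m + 1 else (if j ≤ m then cost j else 10001) := by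
      intro j hj
      rw [hdp1, getD_set_of_lt (by omega)]
      rcases eq_or_ne j (m + 1) with h | h
      · simp [h]
      · simp only [if_neg h]
        exact hval j hj
    -- case split on parity
    rcases Nat.even_or_odd (m + 1) with he | ho
    · -- even: second set happens
      have hpar : (m + 1) % 2 = 0 := by obtain ⟨k, hk⟩ := he; omega
      have hmod : PySem.Int.mod ((1 : Int) + (m : Int)) 2 = 0 := by
        rw [show (1 : Int) + (m : Int) = ((m + 1 : Nat) : Int) by push_cast; ring]
        have := PySem.Int.mod_natCast (m + 1) 2
        rw [show ((2 : Nat) : Int) = (2 : Int) by norm_num, hpar] at this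
        simpa using this
      obtain ⟨hrec, hhalf⟩ := cost_step_even m hpar
      have hdiv : PySem.Int.floordiv ((1 : Int) + (m : Int)) 2 = (((m + 1) / 2 : Nat) : Int) := by
        rw [show (1 : Int) + (m : Int) = ((m + 1 : Nat) : Int) by push_cast; ring]
        exact_mod_cast PySem.Int.floordiv_natCast (m + 1) 2
      refine ⟨dp1.set (m + 1) (cost (m + 1)), ?_, by simp [hlen1], ?_⟩
      · show q4Step (dp, false) (1 + (m : Int)) = _
        have hg3 : (PySem.List.pyGet? dp1 (((m + 1) / 2 : Nat) : Int)).getD 0 = cost ((m + 1) / 2) := by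
          rw [PySem.List.pyGet?_natCast]
          have := hval1 ((m + 1) / 2) (by omega)
          rw [if_neg (by omega), if_pos hhalf] at this
          simpa [List.getD] using this
        have hg4 : (PySem.List.pyGet? dp1 ((1 : Int) + (m : Int))).getD 0 = cost m + 1 := by
          rw [show (1 : Int) + (m : Int) = ((m + 1 : Nat) : Int) by push_cast; ring]
          rw [PySem.List.pyGet?_natCast]
          have := hval1 (m + 1) (by omega)
          rw [if_pos rfl] at this
          simpa [List.getD] using this
        simp only [q4Step, if_neg (by simp : ¬ false = true), if_neg hi0, hiNat, hget1, hget2,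
          hmin1, ← hdp1, if_pos hmod, hdiv, hg3, hg4]
        rw [hrec]
      · intro j hj
        rw [getD_set_of_lt (by omega)]
        rcases eq_or_ne j (m + 1) with h | h
        · simp [h]
        · rw [if_neg h, hval1 j hj, if_neg h]
          rcases Nat.lt_or_ge j (m + 1) with h2 | h2
          · rw [if_pos (by omega), if_pos (by omega)]
          · rw [if_neg (by omega), if_neg (by omega)]
    · -- odd: no second set
      have hpar : (m + 1) % 2 = 1 := by obtain ⟨k, hk⟩ := ho; omega
      have hmod : ¬ PySem.Int.mod ((1 : Int) + (m : Int)) 2 = 0 := by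
        rw [show (1 : Int) + (m : Int) = ((m + 1 : Nat) : Int) by push_cast; ring]
        have := PySem.Int.mod_natCast (m + 1) 2
        rw [show ((2 : Nat) : Int) = (2 : Int) by norm_num, hpar] at this
        rw [this]
        simp
      have hrec := cost_step_odd m hpar
      refine ⟨dp1, ?_, hlen1, ?_⟩
      · show q4Step (dp, false) (1 + (m : Int)) = _
        simp only [q4Step, if_neg (by simp : ¬ false = true), if_neg hi0, hiNat, hget1, hget2,
          hmin1, ← hdp1, if_neg hmod]
      · intro j hj
        rw [hval1 j hj]
        rcases eq_or_ne j (m + 1) with h | h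
        · rw [if_pos h, if_pos (by omega), h, hrec]
        · rw [if_neg h]
          rcases Nat.lt_or_ge j (m + 1) with h2 | h2
          · rw [if_pos (by omega), if_pos (by omega)]
          · rw [if_neg (by omega), if_neg (by omega)]

-- ===== VERDICT (by name: the statement is the Claim_ definition above) =====
theorem q4_spec : Claim_equal_q4 := by
  intro n hdom hpre
  unfold Spec_q4
  have hpre' : (0 : Int) ≤ n := hpre
  have hdom' : n ≤ 2147483648 := by
    unfold Dom_q4 pvDomInt at hdom
    exact (of_decide_eq_true hdom).2
  set N := n.toNat with hNdef
  have hn : n = (N : Int) := by omega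
  have hN31 : N ≤ 2 ^ 31 := by omega
  obtain ⟨dp, hfold, hlen, hval⟩ := q4_inv N hN31 N (le_refl N)
  have hq4 : q4 n = cost N := by
    unfold q4
    simp only []
    have hrep : (n + 1).toNat = N + 1 := by omega
    have hrange : PySem.List.pyRange 1 (n + 1) 1 = PySem.List.pyRange 1 (1 + (N : Int)) 1 := by
      rw [hn]; ring_nf
    rw [hrep, hrange]
    show (PySem.List.pyGet? ((PySem.List.pyRange 1 (1 + (N : Int)) 1).foldl q4Step
      (initTab N, false)).1 n).getD 0 = cost N
    rw [hfold]
    rw [hn, PySem.List.pyGet?_natCast]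
    have := hval N (le_refl N)
    rw [if_pos (le_refl N)] at this
    simpa [List.getD] using this
  rw [hq4]
  unfold q4_alt cost
  rcases eq_or_ne n 0 with h0 | h0
  · simp [h0, show N = 0 by omega]
  · have hN0 : N ≠ 0 := by omega
    rw [if_neg h0, if_neg hN0]
    have : n.natAbs = N := by omega
    rw [this]
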